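-- pv_equiv track=rewrite | github.com/PDDBori/DCASE2020 | dataset.py | find_id
-- ===== SOURCE A (Python) =====
-- def find_id(file_name):
--     for id_num in range(10):
--         string = 'id_0' + str(id_num)
--         if string in file_name:
--             return id_num
--         else:
--             pass
--     return -1
-- ===== SOURCE B (Python) =====
-- def find_id(file_name):
--     # One scan over the filename: collect every digit d occurring as 'id_0<d>'
--     # and keep the smallest; -1 if none. Equal to A's first hit over ids 0..9.
--     best = -1
--     for i in range(len(file_name) - 4):
--         c = file_name[i + 4]
--         if file_name[i:i+4] == 'id_0' and c.isdigit():
--             d = int(c)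
--             if best == -1 or d < best:
--                 best = d
--     return best
-- ===== Notes on version B (the rewrite author's own statement) =====
-- stated objective: alternative
-- what changed: Instead of testing each of the ten candidate id substrings against the filename in ascending order and returning the first hit, B makes a single left-to-right character scan that collects the digit of every embedded id marker and returns the minimum (-1 if none), which equals A's ascending-order first match.
import Mathlib
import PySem

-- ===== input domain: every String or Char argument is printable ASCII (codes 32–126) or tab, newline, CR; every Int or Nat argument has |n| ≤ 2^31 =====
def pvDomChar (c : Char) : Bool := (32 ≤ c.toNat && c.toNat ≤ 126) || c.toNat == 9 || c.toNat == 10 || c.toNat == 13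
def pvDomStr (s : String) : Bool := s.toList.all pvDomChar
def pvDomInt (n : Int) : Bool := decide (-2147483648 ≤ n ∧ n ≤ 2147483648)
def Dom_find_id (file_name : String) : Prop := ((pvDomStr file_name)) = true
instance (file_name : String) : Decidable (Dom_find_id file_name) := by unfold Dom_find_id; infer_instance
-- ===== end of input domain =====

-- B replaces A's ten ascending substring searches ('id_00' in s, 'id_01' in s, …) by one
-- left-to-right scan keeping the minimum embedded 'id_0<d>' digit (objective: alternative).

-- ===== PORT A =====
-- for id_num in range(10): if 'id_0' + str(id_num) in file_name: return id_num / return -1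
-- ('sub in s' is PySem.Chars.isIn on toList; 'id_0' + str(i) is ['i','d','_','0'] ++ toChars i)
def findALoop : List Int → List Char → Int
  | [], _ => -1
  | i :: rest, s =>
      if PySem.Chars.isIn (['i', 'd', '_', '0'] ++ PySem.Int.toChars i) s then i
      else findALoop rest s

def find_id (file_name : String) : Int :=
  findALoop (PySem.List.pyRange 0 10 1) file_name.toList

-- ===== PORT B =====
-- the loop 'for i in range(len(file_name) - 4)' transcribed as recursion over the suffix at i
-- (one step per position, sliding by one); the slice test file_name[i:i+4] == 'id_0' is the
-- elementwise list equality; int(c) for a char passing c.isdigit() on this ASCII domain is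
-- exactly toNat c - 48.
def scanB : List Char → Int → Int
  | a :: rest@(b :: c :: d0 :: e :: _), best =>
      let best' :=
        if [a, b, c, d0] = ['i', 'd', '_', '0'] ∧ e.isDigit then
          let d : Int := (e.toNat : Int) - 48
          if best = -1 ∨ d < best then d else best
        else best
      scanB rest best'
  | _, best => best

def find_id_alt (file_name : String) : Int :=
  scanB file_name.toList (-1)

-- ===== PRECONDITION & SPEC =====
def Spec_find_id (file_name : String) (out : Int) : Prop := out = find_id_alt file_name
instance (file_name : String) (out : Int) : Decidable (Spec_find_id file_name out) := by unfold Spec_find_id; infer_instance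

-- ===== CLAIM (what is proved, stated in full; the proofs are below) =====
def Claim_equal_find_id : Prop := ∀ (file_name : String), Dom_find_id file_name → Spec_find_id file_name (find_id file_name)

-- ===== LEMMAS AND PROOFS =====

-- min with -1 playing the "no id found" sentinel (-1 is the identity)
def mm (x y : Int) : Int := if x = -1 then y else if y = -1 then x else min x y

-- the digit captured by a marker 'id_0<d>' sitting at the head of the list, -1 if none
def pref : List Char → Int
  | a :: b :: c :: d0 :: e :: _ =>
      if [a, b, c, d0] = ['i', 'd', '_', '0'] ∧ e.isDigit then (e.toNat : Int) - 48 else -1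
  | _ => -1

lemma isDigit_iff (e : Char) : e.isDigit = true ↔ 48 ≤ e.toNat ∧ e.toNat ≤ 57 := by
  simp [Char.isDigit, UInt32.le_iff_toNat_le]

lemma char_eq_of_toNat (a b : Char) (h : a.toNat = b.toNat) : a = b :=
  Char.ext (UInt32.toNat_inj.mp h)

-- the pattern of digit c is a prefix of l exactly when the head marker captures c's value
lemma prefix_iff_char (c : Char) (hc : c.isDigit = true) (l : List Char) :
    (['i','d','_','0', c] <+: l) ↔ pref l = (c.toNat : Int) - 48 := by
  have hc' := (isDigit_iff c).mp hc
  rcases l with _ | ⟨a, _ | ⟨b, _ | ⟨c', _ | ⟨d0, _ | ⟨e, r⟩⟩⟩⟩⟩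
  · simp [pref]; omega
  · simp [pref, List.cons_prefix_cons]; omega
  · simp [pref, List.cons_prefix_cons]; omega
  · simp [pref, List.cons_prefix_cons]; omega
  · simp [pref, List.cons_prefix_cons]; omega
  · constructor
    · rintro h
      simp [List.cons_prefix_cons] at h
      obtain ⟨rfl, rfl, rfl, rfl, rfl, -⟩ := h
      simp [pref, hc]
    · intro h
      simp only [pref] at h
      split_ifs at h with hg
      · obtain ⟨he, hd⟩ := hg
        have he2 := (isDigit_iff e).mp hd
        have : e = c := char_eq_of_toNat _ _ (by omega)
        simp only [List.cons_eq_cons] at he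
        obtain ⟨rfl, rfl, rfl, rfl, -⟩ := he
        subst this
        simp [List.cons_prefix_cons]
      · omega

lemma pref_range (l : List Char) : pref l = -1 ∨ (0 ≤ pref l ∧ pref l < 10) := by
  rcases l with _ | ⟨a, _ | ⟨b, _ | ⟨c', _ | ⟨d0, _ | ⟨e, r⟩⟩⟩⟩⟩
  · simp [pref]
  · simp [pref]
  · simp [pref]
  · simp [pref]
  · simp [pref]
  · simp only [pref]
    split_ifs with h
    · rcases h with ⟨-, hd⟩
      have : 48 ≤ e.toNat ∧ e.toNat ≤ 57 := by
        simpa [Char.isDigit, UInt32.le_iff_toNat_le] using hd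
      omega
    · left; rfl

lemma toChars_digit (d : Int) (h0 : 0 ≤ d) (h9 : d < 10) :
    ['i','d','_','0'] ++ PySem.Int.toChars d = ['i','d','_','0', Char.ofNat (48 + d.toNat)] ∧
    (Char.ofNat (48 + d.toNat)).isDigit = true ∧
    ((Char.ofNat (48 + d.toNat)).toNat : Int) - 48 = d := by
  interval_cases d <;> refine ⟨by decide, by decide, by decide⟩

-- the digit-d marker occurs in a :: t iff it sits at the head or occurs in t
lemma key (d : Int) (h0 : 0 ≤ d) (h9 : d < 10) (a : Char) (t : List Char) :
    PySem.Chars.isIn (['i','d','_','0'] ++ PySem.Int.toChars d) (a :: t) = true ↔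
      (pref (a :: t) = d ∨ PySem.Chars.isIn (['i','d','_','0'] ++ PySem.Int.toChars d) t = true) := by
  obtain ⟨hp, hd, hv⟩ := toChars_digit d h0 h9
  rw [hp, PySem.Chars.isIn_iff_infix, PySem.Chars.isIn_iff_infix, List.infix_cons_iff,
    prefix_iff_char _ hd, hv]

lemma chain_mem (ds : List Int) (l : List Char) :
    findALoop ds l = -1 ∨ findALoop ds l ∈ ds := by
  induction ds with
  | nil => left; rfl
  | cons d ds ih =>
      simp only [findALoop]
      split_ifs
      · right; simp
      · rcases ih with h | h
        · left; exact h
        · right; simp [h]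

-- step law of A's chain: for a sorted digit list, consuming one character of the filename
-- takes the sentinel-min with the digit of a marker at the head
lemma chain_step (a : Char) (t : List Char) (ds : List Int) (hs : ds.Pairwise (· < ·))
    (hb : ∀ d ∈ ds, 0 ≤ d ∧ d < 10) :
    findALoop ds (a :: t) =
      mm (if pref (a :: t) ∈ ds then pref (a :: t) else -1) (findALoop ds t) := by
  induction ds with
  | nil => simp [findALoop, mm]
  | cons d ds ih =>
      have hd := hb d (by simp)
      have hs' := (List.pairwise_cons.mp hs).2
      have hlt := (List.pairwise_cons.mp hs).1
      have hb' : ∀ x ∈ ds, 0 ≤ x ∧ x < 10 := fun x hx => hb x (by simp [hx])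
      have ih' := ih hs' hb'
      by_cases hp : pref (a :: t) = d
      · -- head marker digit equals d: LHS returns d immediately
        have hX : findALoop (d :: ds) t = -1 ∨ d ≤ findALoop (d :: ds) t := by
          rcases chain_mem (d :: ds) t with h | h
          · left; exact h
          · right
            rcases List.mem_cons.mp h with h | h
            · omega
            · exact le_of_lt (hlt _ h)
        set X := findALoop (d :: ds) t with hXdef
        have hIn : PySem.Chars.isIn (['i','d','_','0'] ++ PySem.Int.toChars d) (a :: t) = true :=
          (key d hd.1 hd.2 a t).mpr (Or.inl hp)
        simp only [findALoop, hIn, if_true]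
        have hmem : pref (a :: t) ∈ d :: ds := by simp [hp]
        rw [if_pos hmem, hp]
        -- mm d X = d since X = -1 or d ≤ X
        unfold mm; split_ifs <;> omega
      · -- head marker digit (if any) differs from d
        have hq : (pref (a :: t) ∈ d :: ds) ↔ (pref (a :: t) ∈ ds) := by
          simp [List.mem_cons, hp]
        by_cases hc : PySem.Chars.isIn (['i','d','_','0'] ++ PySem.Int.toChars d) t = true
        · have hIn : PySem.Chars.isIn (['i','d','_','0'] ++ PySem.Int.toChars d) (a :: t) = true :=
            (key d hd.1 hd.2 a t).mpr (Or.inr hc)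
          simp only [findALoop, hIn, hc, if_true]
          have hpge : pref (a :: t) ∈ ds → d < pref (a :: t) := fun h => hlt _ h
          simp only [hq]
          split_ifs with h
          · have := hpge h
            unfold mm; split_ifs <;> omega
          · unfold mm; split_ifs <;> omega
        · have hIn : PySem.Chars.isIn (['i','d','_','0'] ++ PySem.Int.toChars d) (a :: t) = false := by
            rcases Bool.eq_false_or_eq_true (PySem.Chars.isIn (['i','d','_','0'] ++ PySem.Int.toChars d) (a :: t)) with h | h
            · rcases (key d hd.1 hd.2 a t).mp h with h' | h'
              · exact absurd h' hp
              · exact absurd h' hc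
            · exact h
          simp only [findALoop, hIn, Bool.false_eq_true, if_false,
            hc, if_false]
          rw [ih']
          simp only [hq]

lemma toChars_len (d : Int) (h0 : 0 ≤ d) (h9 : d < 10) :
    (['i','d','_','0'] ++ PySem.Int.toChars d).length = 5 := by
  interval_cases d <;> decide

lemma chain_short (ds : List Int) (hb : ∀ d ∈ ds, 0 ≤ d ∧ d < 10)
    (l : List Char) (hl : l.length < 5) : findALoop ds l = -1 := by
  induction ds with
  | nil => rfl
  | cons d ds ih =>
      have hd := hb d (by simp)
      have hIn : PySem.Chars.isIn (['i','d','_','0'] ++ PySem.Int.toChars d) l = false := by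
        rcases Bool.eq_false_or_eq_true (PySem.Chars.isIn (['i','d','_','0'] ++ PySem.Int.toChars d) l) with h | h
        · have := (PySem.Chars.isIn_iff_infix _ _).mp h
          have := this.length_le
          rw [toChars_len d hd.1 hd.2] at this
          omega
        · exact h
      simp only [findALoop, hIn, Bool.false_eq_true, if_false]
      exact ih (fun x hx => hb x (by simp [hx]))

lemma mm_ge (x y : Int) (hx : -1 ≤ x) (hy : -1 ≤ y) : -1 ≤ mm x y := by
  unfold mm; split_ifs <;> omega

lemma mm_assoc (x y z : Int) (hx : -1 ≤ x) (hy : -1 ≤ y) (hz : -1 ≤ z) :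
    mm (mm x y) z = mm x (mm y z) := by
  unfold mm; split_ifs <;> omega

-- B's running-minimum update is the sentinel-min with the head marker's digit
lemma comb_eq (a b c d0 e : Char) (r : List Char) (best : Int) (hbest : -1 ≤ best) :
    (if [a, b, c, d0] = ['i', 'd', '_', '0'] ∧ e.isDigit then
        if best = -1 ∨ ((e.toNat : Int) - 48) < best then (e.toNat : Int) - 48 else best
      else best) = mm best (pref (a :: b :: c :: d0 :: e :: r)) := by
  simp only [pref]
  split_ifs with hg h1
  · have := (isDigit_iff e).mp hg.2
    unfold mm; split_ifs <;> omega
  · have := (isDigit_iff e).mp hg.2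
    unfold mm; split_ifs <;> omega
  · unfold mm; split_ifs <;> omega

lemma pyRange10 : PySem.List.pyRange 0 10 1 = [0,1,2,3,4,5,6,7,8,9] := by decide

lemma R10_pairwise : (PySem.List.pyRange 0 10 1).Pairwise (· < ·) := by
  rw [pyRange10]; decide

lemma R10_bounds : ∀ d ∈ PySem.List.pyRange 0 10 1, 0 ≤ d ∧ d < 10 := by
  rw [pyRange10]; decide

lemma R10_mem (p : Int) (h0 : 0 ≤ p) (h9 : p < 10) : p ∈ PySem.List.pyRange 0 10 1 := by
  rw [pyRange10]
  simp only [List.mem_cons]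
  omega

lemma chain_ge (l : List Char) : -1 ≤ findALoop (PySem.List.pyRange 0 10 1) l := by
  rcases chain_mem (PySem.List.pyRange 0 10 1) l with h | h
  · omega
  · exact le_of_lt (by have := R10_bounds _ h; omega)

-- main invariant: B's scan with accumulator best computes the sentinel-min of best
-- and A's chain result
lemma scanB_eq (l : List Char) : ∀ best : Int, -1 ≤ best →
    scanB l best = mm best (findALoop (PySem.List.pyRange 0 10 1) l) := by
  induction l with
  | nil => intro best h; rw [chain_short _ R10_bounds _ (by simp), mm]; simp [scanB]
  | cons a t ih =>
      intro best hbest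
      rcases t with _ | ⟨b, _ | ⟨c, _ | ⟨d0, _ | ⟨e, r⟩⟩⟩⟩
      · rw [chain_short _ R10_bounds _ (by simp), mm]; simp [scanB]
      · rw [chain_short _ R10_bounds _ (by simp), mm]; simp [scanB]
      · rw [chain_short _ R10_bounds _ (by simp), mm]; simp [scanB]
      · rw [chain_short _ R10_bounds _ (by simp), mm]; simp [scanB]
      · have hp : -1 ≤ pref (a :: b :: c :: d0 :: e :: r) := by
          rcases pref_range (a :: b :: c :: d0 :: e :: r) with h | h <;> omega
        have hstep := chain_step a (b :: c :: d0 :: e :: r) _ R10_pairwise R10_bounds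
        have hqp : (if pref (a :: b :: c :: d0 :: e :: r) ∈ PySem.List.pyRange 0 10 1
            then pref (a :: b :: c :: d0 :: e :: r) else -1) = pref (a :: b :: c :: d0 :: e :: r) := by
          rcases pref_range (a :: b :: c :: d0 :: e :: r) with h | h
          · rw [h]; split_ifs <;> rfl
          · rw [if_pos (R10_mem _ h.1 h.2)]
        rw [hqp] at hstep
        calc scanB (a :: b :: c :: d0 :: e :: r) best
            = scanB (b :: c :: d0 :: e :: r)
                (mm best (pref (a :: b :: c :: d0 :: e :: r))) := by
              simp only [scanB]
              rw [comb_eq a b c d0 e r best hbest]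
          _ = mm (mm best (pref (a :: b :: c :: d0 :: e :: r)))
                (findALoop (PySem.List.pyRange 0 10 1) (b :: c :: d0 :: e :: r)) :=
              ih _ (mm_ge _ _ hbest hp)
          _ = mm best (mm (pref (a :: b :: c :: d0 :: e :: r))
                (findALoop (PySem.List.pyRange 0 10 1) (b :: c :: d0 :: e :: r))) :=
              mm_assoc _ _ _ hbest hp (chain_ge _)
          _ = mm best (findALoop (PySem.List.pyRange 0 10 1) (a :: b :: c :: d0 :: e :: r)) := by
              rw [← hstep]

-- ===== VERDICT (by name: the statement is the Claim_ definition above) =====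
theorem find_id_spec : Claim_equal_find_id := by
  intro file_name _hdom
  unfold Spec_find_id find_id find_id_alt
  rw [scanB_eq file_name.toList (-1) (by omega)]
  unfold mm
  simp
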